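-- pv_equiv track=rewrite | github.com/Ingeniums/ingecode-e1-challenges | 3310/sol.py | sequence_to_word
-- ===== SOURCE A (Python) =====
-- SEQUENCE_TO_CHAR = {
--     '2': 'a', '22': 'b', '222': 'c',
--     '3': 'd', '33': 'e', '333': 'f',
--     '4': 'g', '44': 'h', '444': 'i',
--     '5': 'j', '55': 'k', '555': 'l',
--     '6': 'm', '66': 'n', '666': 'o',
--     '7': 'p', '77': 'q', '777': 'r', '7777': 's',
--     '8': 't', '88': 'u', '888': 'v',
--     '9': 'w', '99': 'x', '999': 'y', '9999': 'z',
--     '0': ' '  # Space is mapped to 0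
-- }
--
-- def sequence_to_word(sequence):
--     """Converts a sequence of numbers into the corresponding word."""
--     result = ''
--     buffer = ''
--     for char in sequence:
--         if buffer and buffer[-1] != char:
--             result += SEQUENCE_TO_CHAR.get(buffer, '')
--             buffer = char
--         else:
--             buffer += char
--     # Process the last buffer.
--     result += SEQUENCE_TO_CHAR.get(buffer, '')
--     return result
-- ===== SOURCE B (Python) =====
-- BASE = {'2': 'a', '3': 'd', '4': 'g', '5': 'j', '6': 'm',
--         '7': 'p', '8': 't', '9': 'w', '0': ' '}
--
-- NEXT = {'a': 'b', 'b': 'c', 'd': 'e', 'e': 'f', 'g': 'h', 'h': 'i',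
--         'j': 'k', 'k': 'l', 'm': 'n', 'n': 'o', 'p': 'q', 'q': 'r',
--         'r': 's', 't': 'u', 'u': 'v', 'w': 'x', 'x': 'y', 'y': 'z'}
--
--
-- def sequence_to_word(sequence):
--     """Converts a sequence of numbers into the corresponding word."""
--     out = []
--     prev = None
--     for ch in sequence:
--         if out and prev == ch:
--             # another press of the same key: advance the last emitted letter
--             out.append(NEXT.get(out.pop()))
--         else:
--             out.append(BASE.get(ch))
--         prev = ch
--     return ''.join(ch for ch in out if ch is not None)
-- ===== Notes on version B (the rewrite author's own statement) =====
-- stated objective: alternative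
-- what changed: Replaces A's run-buffer/flush state machine with dict lookup of the whole run by an online algorithm that never materialises a run: each repeated keypress pops the last emitted letter and pushes its successor from a letter-successor table NEXT, dead entries become None and are filtered out once at the end.
import Mathlib
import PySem

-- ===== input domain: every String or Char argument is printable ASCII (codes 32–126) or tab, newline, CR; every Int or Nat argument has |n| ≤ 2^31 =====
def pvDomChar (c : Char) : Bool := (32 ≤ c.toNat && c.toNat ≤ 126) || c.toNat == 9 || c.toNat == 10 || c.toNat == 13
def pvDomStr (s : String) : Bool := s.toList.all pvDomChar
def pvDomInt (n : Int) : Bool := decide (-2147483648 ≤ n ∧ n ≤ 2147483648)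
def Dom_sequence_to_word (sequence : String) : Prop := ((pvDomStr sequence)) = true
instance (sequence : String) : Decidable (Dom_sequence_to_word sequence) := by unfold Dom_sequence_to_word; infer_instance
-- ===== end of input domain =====

-- B replaces A's run-buffer/flush-with-dict-lookup state machine by an online algorithm
-- that amends the last emitted letter via a successor table (pop/push), never building a
-- run string; objective: alternative.


-- ===== PORT A =====
-- the module-level dict; strings are represented as List Char throughout
def SEQUENCE_TO_CHAR : PySem.Dict (List Char) (List Char) := PySem.Dict.ofList
  [ (['2'], ['a']), (['2','2'], ['b']), (['2','2','2'], ['c']),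
    (['3'], ['d']), (['3','3'], ['e']), (['3','3','3'], ['f']),
    (['4'], ['g']), (['4','4'], ['h']), (['4','4','4'], ['i']),
    (['5'], ['j']), (['5','5'], ['k']), (['5','5','5'], ['l']),
    (['6'], ['m']), (['6','6'], ['n']), (['6','6','6'], ['o']),
    (['7'], ['p']), (['7','7'], ['q']), (['7','7','7'], ['r']), (['7','7','7','7'], ['s']),
    (['8'], ['t']), (['8','8'], ['u']), (['8','8','8'], ['v']),
    (['9'], ['w']), (['9','9'], ['x']), (['9','9','9'], ['y']), (['9','9','9','9'], ['z']),
    (['0'], [' ']) ]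

-- the loop body of A: state = (result, buffer)
def stepA (st : List Char × List Char) (c : Char) : List Char × List Char :=
  if st.2 ≠ [] ∧ st.2.getLast? ≠ some c then
    (st.1 ++ SEQUENCE_TO_CHAR.getD st.2 [], [c])
  else (st.1, st.2 ++ [c])

def sequence_to_word (sequence : String) : String :=
  let st := sequence.toList.foldl stepA ([], [])
  String.ofList (st.1 ++ SEQUENCE_TO_CHAR.getD st.2 [])

-- ===== PORT B =====
-- B's module-level dicts: base letter of each digit, and letter successor on the same key
def BASE : PySem.Dict Char Char := PySem.Dict.ofList
  [ ('2', 'a'), ('3', 'd'), ('4', 'g'), ('5', 'j'), ('6', 'm'),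
    ('7', 'p'), ('8', 't'), ('9', 'w'), ('0', ' ') ]

def NEXT : PySem.Dict Char Char := PySem.Dict.ofList
  [ ('a', 'b'), ('b', 'c'), ('d', 'e'), ('e', 'f'), ('g', 'h'), ('h', 'i'),
    ('j', 'k'), ('k', 'l'), ('m', 'n'), ('n', 'o'), ('p', 'q'), ('q', 'r'),
    ('r', 's'), ('t', 'u'), ('u', 'v'), ('w', 'x'), ('x', 'y'), ('y', 'z') ]

-- NEXT.get(x) where x is the popped entry (possibly None)
def nextOpt (o : Option Char) : Option Char := o.bind (fun l => NEXT.get? l)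

-- B's loop body: state = (out, prev); 'if out and prev == ch' then pop/push NEXT.get
def stepB (st : List (Option Char) × Option Char) (c : Char) :
    List (Option Char) × Option Char :=
  if st.1 ≠ [] ∧ st.2 = some c then
    (st.1.dropLast ++ [nextOpt (st.1.getLast?.getD none)], some c)
  else (st.1 ++ [BASE.get? c], some c)

def sequence_to_word_alt (sequence : String) : String :=
  String.ofList ((sequence.toList.foldl stepB ([], none)).1.filterMap id)

-- ===== PRECONDITION & SPEC =====
def Spec_sequence_to_word (sequence : String) (out : String) : Prop := out = sequence_to_word_alt sequence
instance (sequence : String) (out : String) : Decidable (Spec_sequence_to_word sequence out) := by unfold Spec_sequence_to_word; infer_instance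

-- ===== CLAIM (what is proved, stated in full; the proofs are below) =====
def Claim_equal_sequence_to_word : Prop := ∀ (sequence : String), Dom_sequence_to_word sequence → Spec_sequence_to_word sequence (sequence_to_word sequence)

-- ===== LEMMAS AND PROOFS =====

-- maximal runs of a list, as (char, length); shared characterisation of both loops
def runsGo (c : Char) (n : Nat) : List Char → List (Char × Nat)
  | [] => [(c, n)]
  | d :: cs => if d = c then runsGo c (n + 1) cs else (c, n) :: runsGo d 1 cs

-- k applications of nextOpt (the letter after k extra presses, none = dead)
def iterNext : Nat → Option Char → Option Char
  | 0, x => x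
  | n + 1, x => nextOpt (iterNext n x)

-- ---------- A side ----------

-- A's remaining output given the current buffer (tail-of-loop characterisation)
def restA (buffer : List Char) : List Char → List Char
  | [] => SEQUENCE_TO_CHAR.getD buffer []
  | c :: cs =>
    if buffer ≠ [] ∧ buffer.getLast? ≠ some c then
      SEQUENCE_TO_CHAR.getD buffer [] ++ restA [c] cs
    else restA (buffer ++ [c]) cs

lemma foldA_eq_restA (cs : List Char) (res buf : List Char) :
    (cs.foldl stepA (res, buf)).1 ++ SEQUENCE_TO_CHAR.getD (cs.foldl stepA (res, buf)).2 []
      = res ++ restA buf cs := by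
  induction cs generalizing res buf with
  | nil => simp [restA]
  | cons c cs ih =>
    simp only [List.foldl_cons, stepA, restA]
    split
    · rw [ih]; simp
    · rw [ih]

lemma restA_runs (cs : List Char) (c : Char) (k : Nat) :
    restA (List.replicate (k + 1) c) cs
      = ((runsGo c (k + 1) cs).map
          (fun p => SEQUENCE_TO_CHAR.getD (List.replicate p.2 p.1) [])).flatten := by
  induction cs generalizing c k with
  | nil => simp [restA, runsGo]
  | cons d cs ih =>
    by_cases hdc : d = c
    · subst hdc
      have h1 : ¬ ((List.replicate (k + 1) d ≠ []) ∧ (List.replicate (k + 1) d).getLast? ≠ some d) := by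
        simp [List.getLast?_replicate]
      have h2 : List.replicate (k + 1) d ++ [d] = List.replicate (k + 1 + 1) d := by
        simp [List.replicate_succ' (n := k + 1)]
      simp only [restA, if_neg h1, h2, runsGo]
      exact ih d (k + 1)
    · have h1 : ((List.replicate (k + 1) c ≠ []) ∧ (List.replicate (k + 1) c).getLast? ≠ some d) := by
        refine ⟨by simp, ?_⟩
        simp [List.getLast?_replicate]
        exact fun h => hdc h.symm
      have h3 : [d] = List.replicate (0 + 1) d := by simp
      simp only [restA, if_pos h1, runsGo, if_neg hdc, List.map_cons, List.flatten_cons,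
        h3, ih d 0]

-- ---------- B side ----------

lemma foldB_runs (cs : List Char) (out : List (Option Char)) (c : Char) (k : Nat) :
    (cs.foldl stepB (out ++ [iterNext k (BASE.get? c)], some c)).1
      = out ++ (runsGo c (k + 1) cs).map (fun p => iterNext (p.2 - 1) (BASE.get? p.1)) := by
  induction cs generalizing out c k with
  | nil => simp [runsGo]
  | cons d cs ih =>
    by_cases hdc : d = c
    · subst hdc
      have hstep : stepB (out ++ [iterNext k (BASE.get? d)], some d) d
          = (out ++ [iterNext (k + 1) (BASE.get? d)], some d) := by
        rw [stepB, if_pos (by simp)]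
        simp [iterNext]
      rw [List.foldl_cons, hstep, ih]
      simp [runsGo]
    · have hstep : stepB (out ++ [iterNext k (BASE.get? c)], some c) d
          = ((out ++ [iterNext k (BASE.get? c)]) ++ [iterNext 0 (BASE.get? d)], some d) := by
        rw [stepB, if_neg]
        · rfl
        · rintro ⟨-, h⟩
          exact hdc (Option.some.inj h).symm
      rw [List.foldl_cons, hstep, ih]
      simp [runsGo, hdc]

-- ---------- per-run agreement ----------

-- every key of the table has length at most 4
lemma keys_short : ∀ p ∈ SEQUENCE_TO_CHAR.items, p.1.length ≤ 4 := by decide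

-- every key of the table starts with one of the digit characters 0,2..9
lemma keys_head : ∀ p ∈ SEQUENCE_TO_CHAR.items,
    p.1.head? = some '0' ∨ p.1.head? = some '2' ∨ p.1.head? = some '3' ∨
    p.1.head? = some '4' ∨ p.1.head? = some '5' ∨ p.1.head? = some '6' ∨
    p.1.head? = some '7' ∨ p.1.head? = some '8' ∨ p.1.head? = some '9' := by decide

lemma base_keys : ∀ p ∈ BASE.items,
    p.1 = '0' ∨ p.1 = '2' ∨ p.1 = '3' ∨ p.1 = '4' ∨ p.1 = '5' ∨
    p.1 = '6' ∨ p.1 = '7' ∨ p.1 = '8' ∨ p.1 = '9' := by decide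

lemma getD_long (l : List Char) (h : 4 < l.length) : SEQUENCE_TO_CHAR.getD l [] = [] := by
  rw [PySem.Dict.getD, PySem.Dict.get?, List.find?_eq_none.mpr]
  · rfl
  · intro p hp
    simp only [beq_iff_eq]
    intro he
    have := keys_short p hp
    rw [he] at this
    omega

lemma getD_nondigit (c : Char) (k : Nat)
    (h0 : c ≠ '0') (h2 : c ≠ '2') (h3 : c ≠ '3') (h4 : c ≠ '4') (h5 : c ≠ '5')
    (h6 : c ≠ '6') (h7 : c ≠ '7') (h8 : c ≠ '8') (h9 : c ≠ '9') :
    SEQUENCE_TO_CHAR.getD (List.replicate (k + 1) c) [] = [] := by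
  rw [PySem.Dict.getD, PySem.Dict.get?, List.find?_eq_none.mpr]
  · rfl
  · intro p hp
    simp only [beq_iff_eq]
    intro he
    have hh := keys_head p hp
    rw [he, List.head?_replicate] at hh
    simp at hh
    rcases hh with h | h | h | h | h | h | h | h | h <;> simp_all

lemma base_nondigit (c : Char)
    (h0 : c ≠ '0') (h2 : c ≠ '2') (h3 : c ≠ '3') (h4 : c ≠ '4') (h5 : c ≠ '5')
    (h6 : c ≠ '6') (h7 : c ≠ '7') (h8 : c ≠ '8') (h9 : c ≠ '9') :
    BASE.get? c = none := by
  rw [PySem.Dict.get?, List.find?_eq_none.mpr]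
  · rfl
  · intro p hp
    simp only [beq_iff_eq]
    intro he
    rcases base_keys p hp with h | h | h | h | h | h | h | h | h <;> rw [h] at he <;>
      first
      | exact h0 he.symm
      | exact h2 he.symm
      | exact h3 he.symm
      | exact h4 he.symm
      | exact h5 he.symm
      | exact h6 he.symm
      | exact h7 he.symm
      | exact h8 he.symm
      | exact h9 he.symm

lemma iterNext_none (k : Nat) : iterNext k none = none := by
  induction k with
  | zero => rfl
  | succ n ih => simp [iterNext, ih, nextOpt]

lemma iterNext_add (m n : Nat) (x : Option Char) :
    iterNext (m + n) x = iterNext n (iterNext m x) := by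
  induction n with
  | zero => rfl
  | succ n ih => simp [iterNext, ih]

lemma iterNext_four (c : Char)
    (h : c = '0' ∨ c = '2' ∨ c = '3' ∨ c = '4' ∨ c = '5' ∨
         c = '6' ∨ c = '7' ∨ c = '8' ∨ c = '9') :
    iterNext 4 (BASE.get? c) = none := by
  rcases h with h | h | h | h | h | h | h | h | h <;> subst h <;> decide

-- the heart of the proof: one run of k+1 presses of c gives the same piece in A and in B
lemma run_agree (c : Char) (k : Nat) :
    (iterNext k (BASE.get? c)).toList = SEQUENCE_TO_CHAR.getD (List.replicate (k + 1) c) [] := by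
  by_cases hd : c = '0' ∨ c = '2' ∨ c = '3' ∨ c = '4' ∨ c = '5' ∨
      c = '6' ∨ c = '7' ∨ c = '8' ∨ c = '9'
  · rcases lt_or_ge k 4 with hk | hk
    · interval_cases k <;>
        (rcases hd with h | h | h | h | h | h | h | h | h <;> subst h <;> decide)
    · rw [getD_long _ (by simp only [List.length_replicate]; omega)]
      obtain ⟨m, rfl⟩ : ∃ m, k = 4 + m := ⟨k - 4, by omega⟩
      rw [iterNext_add, iterNext_four c hd, iterNext_none]
      rfl
  · push Not at hd
    obtain ⟨h0, h2, h3, h4, h5, h6, h7, h8, h9⟩ := hd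
    rw [getD_nondigit c k h0 h2 h3 h4 h5 h6 h7 h8 h9,
      base_nondigit c h0 h2 h3 h4 h5 h6 h7 h8 h9, iterNext_none]
    rfl

lemma runsGo_pos (cs : List Char) (c : Char) (n : Nat) (hn : 0 < n) :
    ∀ p ∈ runsGo c n cs, 0 < p.2 := by
  induction cs generalizing c n with
  | nil =>
    intro p hp
    rcases List.mem_singleton.mp hp with rfl
    exact hn
  | cons d cs ih =>
    intro p hp
    simp only [runsGo] at hp
    split at hp
    · exact ih c (n + 1) (by omega) p hp
    · rcases List.mem_cons.mp hp with h | h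
      · subst h; exact hn
      · exact ih d 1 (by omega) p h

lemma filterMap_id_eq_flatten (l : List (Option Char)) :
    l.filterMap id = (l.map Option.toList).flatten := by
  induction l with
  | nil => rfl
  | cons o l ih => cases o <;> simpa [List.filterMap_cons] using ih

-- ===== VERDICT (by name: the statement is the Claim_ definition above) =====
theorem sequence_to_word_spec : Claim_equal_sequence_to_word := by
  intro s _
  unfold Spec_sequence_to_word sequence_to_word sequence_to_word_alt
  cases hs : s.toList with
  | nil => rfl
  | cons c cs =>
    refine congrArg String.ofList ?_
    -- A side: fold = concat of per-run dict lookups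
    have hA := foldA_eq_restA (c :: cs) [] []
    simp only [List.nil_append] at hA
    have hA0 : restA [] (c :: cs) = restA [c] cs := by simp [restA]
    rw [hA, hA0, show [c] = List.replicate (0 + 1) c by simp, restA_runs]
    -- B side: fold = per-run iterated successors, then filterMap
    have hB1 : stepB ([], none) c = ([] ++ [iterNext 0 (BASE.get? c)], some c) := by
      simp [stepB, iterNext]
    rw [List.foldl_cons (f := stepB), hB1, foldB_runs, List.nil_append]
    rw [filterMap_id_eq_flatten, List.map_map]
    congr 1
    apply List.map_congr_left
    intro p hp
    simp only [Function.comp]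
    rw [run_agree p.1 (p.2 - 1)]
    have := runsGo_pos cs c 1 (by omega) p hp
    congr 2
    omega
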